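-- pv_equiv track=rewrite | github.com/rayane-l/BOF_tool | bof.py | badchars
-- ===== SOURCE A (Python) =====
-- def badchars(value):
--
--  c = 256
--
--  string = ""
--  for i in range(c):
--   data = str(hex(i))
--   if(i<16):
--     data = data.replace("0x","\\x0")
--   else:
--     data = data.replace("0x","\\x")
--   string += data
--
--  n = value*4
--  chunks = [string[i:i+n] for i in range(0, len(string), n)]
--
--  return chunks
-- ===== SOURCE B (Python) =====
-- def badchars(value):
--     digits = "0123456789abcdef"
--     tokens = ["\\x" + hi + lo for hi in digits for lo in digits]
--     if value < 1:
--         return []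
--     chunks = []
--     rest = tokens
--     while rest:
--         chunks.append("".join(rest[:value]))
--         rest = rest[value:]
--     return chunks
-- ===== Notes on version B (the rewrite author's own statement) =====
-- stated objective: alternative
-- what changed: B generates the 256 tokens \x<hi><lo> by a nested comprehension over the 16 hex digit characters (no hex()/replace per byte) and forms the chunks with a consumer while-loop that takes value tokens and drops them from the remaining token list, instead of concatenating one 1024-char string and slicing it at character offsets value*4 over a range.
-- outside the precondition, e.g. on badchars(0): A raises ValueError, B returns []
import Mathlib
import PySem

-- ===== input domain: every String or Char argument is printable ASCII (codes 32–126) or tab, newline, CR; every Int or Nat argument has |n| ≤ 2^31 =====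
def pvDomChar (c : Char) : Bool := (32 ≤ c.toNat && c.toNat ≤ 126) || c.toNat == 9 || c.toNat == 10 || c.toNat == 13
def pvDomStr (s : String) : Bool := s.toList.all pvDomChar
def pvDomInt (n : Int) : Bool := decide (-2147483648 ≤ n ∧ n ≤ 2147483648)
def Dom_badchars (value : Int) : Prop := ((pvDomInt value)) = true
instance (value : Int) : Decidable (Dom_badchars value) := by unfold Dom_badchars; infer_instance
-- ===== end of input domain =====

-- B builds each token "\x"+hi+lo by a nested comprehension over the 16 hex digit characters
-- (no hex()/replace) and forms the chunks with a take/drop consumer loop over the token list,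
-- instead of concatenating one 1024-char string and slicing it at character offsets value*4.

-- ===== PORT A =====
-- str(hex(i)) for an int i: "0x"+lowercase hex digits ("-0x…" for negatives); exact
-- (Nat.toDigits 16 produces Python's lowercase hex digit string, "0" for 0).
def pyHexChars (i : Int) : List Char :=
  if i < 0 then '-' :: '0' :: 'x' :: Nat.toDigits 16 (-i).toNat
  else '0' :: 'x' :: Nat.toDigits 16 i.toNat

def badchars (value : Int) : List String :=
  -- c = 256; string = ""; for i in range(c): … string += data
  let string : List Char :=
    (PySem.List.pyRange 0 256 1).foldl
      (fun acc i =>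
        let data := pyHexChars i
        let data :=
          if i < 16 then PySem.Chars.replace data "0x".toList "\\x0".toList
          else PySem.Chars.replace data "0x".toList "\\x".toList
        acc ++ data) []
  -- n = value*4; chunks = [string[i:i+n] for i in range(0, len(string), n)]
  let n := value * 4
  (PySem.List.pyRange 0 (string.length : Int) n).map
    (fun i => String.ofList (PySem.List.slice string (some i) (some (i + n))))

-- ===== PORT B =====
-- the while loop: while rest: chunks.append("".join(rest[:value])); rest = rest[value:]
-- (only reached with value ≥ 1, where rest[:v] = take v and rest[v:] = drop v;
-- on a nonempty list drop v = drop (v-1) of the tail, the structural step used here)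
def chunkJoin (v : Nat) : List (List Char) → List String
  | [] => []
  | x :: xs =>
      String.ofList (PySem.Chars.join [] (List.take v (x :: xs)))
        :: chunkJoin v (List.drop (v - 1) xs)
termination_by l => l.length
decreasing_by simp only [List.length_drop, List.length_cons]; omega

def badchars_alt (value : Int) : List String :=
  -- digits = "0123456789abcdef"; tokens = ["\x" + hi + lo for hi in digits for lo in digits]
  let digits := "0123456789abcdef".toList
  let tokens : List (List Char) :=
    digits.flatMap (fun hi => digits.map (fun lo => "\\x".toList ++ [hi] ++ [lo]))
  -- if value < 1: return []
  if value < 1 then []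
  else chunkJoin value.toNat tokens

-- ===== PRECONDITION & SPEC =====
-- Pre_ excludes only value = 0, where Python A raises ValueError (range step 0).
def Pre_badchars (value : Int) : Prop := value ≠ 0
instance (value : Int) : Decidable (Pre_badchars value) := by unfold Pre_badchars; infer_instance
def pvWitness_badchars : Int := 4

def Spec_badchars (value : Int) (out : List String) : Prop := out = badchars_alt value
instance (value : Int) (out : List String) : Decidable (Spec_badchars value out) := by unfold Spec_badchars; infer_instance

-- ===== CLAIM (what is proved, stated in full; the proofs are below) =====
def Claim_equal_badchars : Prop := ∀ (value : Int), Dom_badchars value → Pre_badchars value → Spec_badchars value (badchars value)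

-- ===== LEMMAS AND PROOFS =====

-- The concrete token list B builds (closed term).
def pvToks : List (List Char) :=
  "0123456789abcdef".toList.flatMap
    (fun hi => "0123456789abcdef".toList.map (fun lo => "\\x".toList ++ [hi] ++ [lo]))

-- The concrete string A builds (closed term).
def pvStr : List Char :=
  (PySem.List.pyRange 0 256 1).foldl
    (fun acc i =>
      let data := pyHexChars i
      let data :=
        if i < 16 then PySem.Chars.replace data "0x".toList "\\x0".toList
        else PySem.Chars.replace data "0x".toList "\\x".toList
      acc ++ data) []

theorem badchars_eq (value : Int) :
    badchars value = (PySem.List.pyRange 0 (pvStr.length : Int) (value * 4)).map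
      (fun i => String.ofList (PySem.List.slice pvStr (some i) (some (i + value * 4)))) := rfl

theorem badchars_alt_eq (value : Int) :
    badchars_alt value = if value < 1 then [] else chunkJoin value.toNat pvToks := rfl

set_option maxRecDepth 100000 in
theorem pvStr_eq_flatten : pvStr = pvToks.flatten := by decide

set_option maxRecDepth 100000 in
theorem pvStr_length : (pvStr.length : Int) = 1024 := by decide

set_option maxRecDepth 100000 in
theorem pvToks_len4 : ∀ x ∈ pvToks, x.length = 4 := by decide

theorem join_nil_sep (l : List (List Char)) : PySem.Chars.join [] l = l.flatten := by
  induction l with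
  | nil => simp [PySem.Chars.join_nil]
  | cons a l ih =>
    cases l with
    | nil => simp [PySem.Chars.join_singleton]
    | cons b t =>
      rw [PySem.Chars.join_cons_cons]
      simp [ih]

-- the consumer loop computes exactly the batches toks[v*k : v*k+v]
theorem chunkJoin_eq (v : Nat) (hv : 1 ≤ v) (toks : List (List Char)) :
    chunkJoin v toks = (List.range ((toks.length + v - 1) / v)).map
      (fun k => String.ofList (PySem.Chars.join [] ((toks.drop (v * k)).take v))) := by
  obtain ⟨n, rfl⟩ : ∃ n, v = n + 1 := ⟨v - 1, by omega⟩
  generalize hL : toks.length = L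
  induction L using Nat.strong_induction_on generalizing toks with
  | _ L ih0 =>
  cases toks with
  | nil =>
    have h0 : L = 0 := by simpa using hL.symm
    subst h0
    simp only [chunkJoin]
    rw [Nat.div_eq_of_lt (by omega : 0 + (n + 1) - 1 < n + 1)]
    simp
  | cons x xs =>
    simp only [chunkJoin]
    have ih := ih0 (List.drop (n + 1 - 1) xs).length
      (by subst hL; simp only [List.length_drop, List.length_cons]; omega)
      (List.drop (n + 1 - 1) xs) rfl
    subst hL
    have hcount : ((x :: xs).length + (n + 1) - 1) / (n + 1)
        = ((List.drop (n + 1 - 1) xs).length + (n + 1) - 1) / (n + 1) + 1 := by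
      simp only [List.length_drop, List.length_cons, Nat.add_sub_cancel]
      by_cases h : n ≤ xs.length
      · rw [show xs.length - n + (n + 1) - 1 = xs.length by omega,
            show xs.length + 1 + (n + 1) - 1 = xs.length + (n + 1) by omega,
            Nat.add_div_right _ (by omega)]
      · rw [show xs.length - n = 0 by omega,
            Nat.div_eq_of_lt (by omega : 0 + (n + 1) - 1 < n + 1),
            Nat.div_eq_of_lt_le (show 1 * (n + 1) ≤ xs.length + 1 + (n + 1) - 1 by omega)
              (show xs.length + 1 + (n + 1) - 1 < (1 + 1) * (n + 1) by omega)]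
    rw [hcount, List.range_succ_eq_map, List.map_cons, List.map_map, ih]
    refine congrArg₂ List.cons (by simp) ?_
    apply List.map_congr_left
    intro k _
    simp only [Function.comp_apply]
    have hd : List.drop ((n + 1) * (k + 1)) (x :: xs)
        = List.drop ((n + 1) * k) (List.drop (n + 1 - 1) xs) := by
      rw [Nat.add_sub_cancel, List.drop_drop,
          show (n + 1) * (k + 1) = ((n + 1) * k + n) + 1 by ring,
          List.drop_succ_cons]
      congr 1
      ring
    rw [hd]

-- slicing the flattening of uniformly-4-long blocks at multiples of 4 = flattening a block slice
theorem flatten_drop_take (toks : List (List Char)) (h : ∀ x ∈ toks, x.length = 4) :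
    ∀ (j t : Nat), ((toks.flatten).drop (4 * j)).take (4 * t) = ((toks.drop j).take t).flatten := by
  induction toks with
  | nil => intro j t; simp
  | cons c cs ih =>
    have hc : c.length = 4 := h c (by simp)
    have h' : ∀ x ∈ cs, x.length = 4 := fun x hx => h x (by simp [hx])
    intro j t
    cases j with
    | zero =>
      cases t with
      | zero => simp
      | succ t =>
        have ht : List.take (4 * t) cs.flatten = (List.take t cs).flatten := by
          simpa using ih h' 0 t
        simp only [Nat.mul_zero, List.drop_zero, List.flatten_cons, List.take_append,
          List.take_succ_cons]
        rw [List.take_of_length_le (by omega), hc,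
          show 4 * (t + 1) - 4 = 4 * t by omega, ht]
    | succ j =>
      simp only [List.flatten_cons, List.drop_append]
      rw [List.drop_of_length_le (by omega : c.length ≤ 4 * (j + 1)),
          show 4 * (j + 1) - c.length = 4 * j by omega]
      simpa using ih h' j t

set_option maxRecDepth 100000 in
theorem pvToks_length : pvToks.length = 256 := by decide

theorem count_eq (m : Nat) (hm : 0 < m) :
    ((1024 - 0 + (m : Int) * 4 - 1) / ((m : Int) * 4)).toNat = (256 + m - 1) / m := by
  rw [show (1024 - 0 + (m : Int) * 4 - 1) = ((1023 + 4 * m : Nat) : Int) by push_cast; ring,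
      show ((m : Int) * 4) = ((4 * m : Nat) : Int) by push_cast; ring,
      ← Int.natCast_div, Int.toNat_natCast,
      show 256 + m - 1 = 255 + m by omega]
  have h1 := Nat.div_mul_le_self (255 + m) m
  have h2 : (255 + m) < ((255 + m) / m + 1) * m := by
    have := Nat.div_add_mod (255 + m) m
    have := Nat.mod_lt (255 + m) hm
    rw [show ((255 + m) / m + 1) * m = m * ((255 + m) / m) + m by ring]
    omega
  apply Nat.div_eq_of_lt_le
  · rw [show ((255 + m) / m) * (4 * m) = 4 * (((255 + m) / m) * m) by ring]; omega
  · rw [show ((255 + m) / m + 1) * (4 * m) = 4 * (((255 + m) / m + 1) * m) by ring]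
    rw [show ((255 + m) / m + 1) * m = (255 + m) / m * m + m by ring]
    rw [show ((255 + m) / m + 1) * m = (255 + m) / m * m + m by ring] at h2
    omega

theorem badchars_pos (value : Int) (hv : 0 < value) :
    badchars value = badchars_alt value := by
  obtain ⟨m, hm, hmpos⟩ : ∃ m : Nat, value = (m : Int) ∧ 0 < m :=
    ⟨value.toNat, by omega, by omega⟩
  subst hm
  rw [badchars_eq, badchars_alt_eq, pvStr_length,
      if_neg (by omega : ¬ ((m : Int) < 1)),
      show ((m : Int)).toNat = m from Int.toNat_natCast m,
      chunkJoin_eq m (by omega) pvToks]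
  rw [PySem.List.pyRange_of_pos 0 1024 (by positivity : (0:Int) < (m : Int) * 4)]
  rw [if_pos (by omega : (0:Int) < 1024)]
  rw [count_eq m hmpos, pvToks_length, List.map_map]
  apply List.map_congr_left
  intro k _
  simp only [Function.comp]
  have e1 : (0 + (m : Int) * 4 * (k : Int)) = ((4 * (m * k) : Nat) : Int) := by push_cast; ring
  rw [e1,
      show ((4 * (m * k) : Nat) : Int) + (m : Int) * 4
        = ((4 * (m * k) : Nat) : Int) + ((4 * m : Nat) : Int) from by push_cast; ring,
      PySem.List.slice_natCast_add]
  rw [join_nil_sep, pvStr_eq_flatten]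
  rw [flatten_drop_take pvToks pvToks_len4 (m * k) m]

theorem pyRange_neg_step_nil (b s : Int) (hb : 0 ≤ b) (hs : s < 0) :
    PySem.List.pyRange 0 b s = [] := by
  simp only [PySem.List.pyRange]
  rw [if_neg (by omega : ¬ s = 0)]
  simp only [if_neg (by omega : ¬ (0:Int) < s), if_neg (by omega : ¬ b < 0),
    List.range_zero, List.map_nil]

theorem badchars_neg (value : Int) (hv : value < 0) :
    badchars value = badchars_alt value := by
  rw [badchars_eq, badchars_alt_eq, pvStr_length,
      pyRange_neg_step_nil 1024 (value * 4) (by omega) (by omega),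
      if_pos (by omega : value < 1)]
  rfl

-- ===== VERDICT (by name: the statement is the Claim_ definition above) =====
theorem badchars_spec : Claim_equal_badchars := by
  intro value _ hpre
  unfold Spec_badchars
  rcases lt_or_gt_of_ne hpre with h | h
  · exact badchars_neg value h
  · exact badchars_pos value h
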